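-- pv_equiv track=rewrite | github.com/jacobaek/CE450-HW3 | HW#3.py | card_sum
-- ===== SOURCE A (Python) =====
-- def card_sum(n):
--     a=[]
--     result=0
--     while True:
--         if(n<10):
--             a.append(n)
--             break
--         a.append(n%10)
--         n=n//10
--
--     for i in range(len(a)-1,-1,-1):
--         if(i%2==1):
--
--             a[i]=a[i]*2
--             if(a[i]>9):
--                 s1=a[i]%10
--                 s2=a[i]//10
--                 a[i]=s1+s2
--         result+=a[i]
--     return result
-- ===== SOURCE B (Python) =====
-- def card_sum(n):
--     # Recursive digit walk: no list, one pass; position i counted from the LSB.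
--     def adjust(d, i):
--         if i % 2 == 1:
--             d = d * 2
--             if d > 9:
--                 d = d % 10 + d // 10
--         return d
--
--     def go(n, i):
--         if n < 10:
--             return adjust(n, i)
--         return adjust(n % 10, i) + go(n // 10, i + 1)
--
--     return go(n, 0)
-- ===== Notes on version B (the rewrite author's own statement) =====
-- stated objective: simpler
-- what changed: B replaces A's two passes (build the LSB-first digit list with a while loop, then walk it backwards in place doubling odd positions) by a single recursion over the digits carrying a position counter, with no list and no mutation.
import Mathlib
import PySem

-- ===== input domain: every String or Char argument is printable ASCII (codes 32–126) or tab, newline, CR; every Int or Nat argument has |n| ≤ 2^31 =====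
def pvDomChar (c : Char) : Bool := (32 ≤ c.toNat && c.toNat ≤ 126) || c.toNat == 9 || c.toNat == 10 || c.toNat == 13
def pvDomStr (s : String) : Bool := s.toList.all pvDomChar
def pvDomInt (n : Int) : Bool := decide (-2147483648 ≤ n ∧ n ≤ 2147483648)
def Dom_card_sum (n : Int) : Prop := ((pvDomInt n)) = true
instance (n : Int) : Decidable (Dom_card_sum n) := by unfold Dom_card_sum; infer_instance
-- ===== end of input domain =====

-- B replaces A's two passes (build a digit list, then walk it backwards doubling odd
-- positions) by a single recursion over the digits with a position counter: simpler, no list.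

-- ===== PORT A =====
-- the 'while True' loop: accumulates digits into a (list append), LSB first
def pvWhileA (a : List Int) (n : Int) : List Int :=
  if _h : n < 10 then a ++ [n]
  else pvWhileA (a ++ [PySem.Int.mod n 10]) (PySem.Int.floordiv n 10)
termination_by n.toNat
decreasing_by
  rw [PySem.Int.floordiv_eq_ediv_of_pos (by omega : (0:Int) < 10)]
  omega

-- the for-loop body; the two Python assignments to a[i] are transcribed as one pySetD of
-- the conditionally folded value (a[i]*2, then digit-summed if > 9), which writes the same cell
def pvLoopBodyA (st : List Int × Int) (i : Int) : List Int × Int :=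
  if PySem.Int.mod i 2 = 1 then
    let ai := PySem.List.pyGetD st.1 i 0 * 2
    let ai := if ai > 9 then PySem.Int.mod ai 10 + PySem.Int.floordiv ai 10 else ai
    let a' := PySem.List.pySetD st.1 i ai
    (a', st.2 + PySem.List.pyGetD a' i 0)
  else (st.1, st.2 + PySem.List.pyGetD st.1 i 0)

def card_sum (n : Int) : Int :=
  let a := pvWhileA [] n
  let st := (PySem.List.pyRange ((a.length : Int) - 1) (-1) (-1)).foldl pvLoopBodyA (a, 0)
  st.2

-- ===== PORT B =====
def pvAdjustB (d i : Int) : Int :=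
  if PySem.Int.mod i 2 = 1 then
    let d2 := d * 2
    if d2 > 9 then PySem.Int.mod d2 10 + PySem.Int.floordiv d2 10 else d2
  else d

def pvGoB (n i : Int) : Int :=
  if _h : n < 10 then pvAdjustB n i
  else pvAdjustB (PySem.Int.mod n 10) i + pvGoB (PySem.Int.floordiv n 10) (i + 1)
termination_by n.toNat
decreasing_by
  rw [PySem.Int.floordiv_eq_ediv_of_pos (by omega : (0:Int) < 10)]
  omega

def card_sum_alt (n : Int) : Int := pvGoB n 0

-- ===== PRECONDITION & SPEC =====
def Spec_card_sum (n : Int) (out : Int) : Prop := out = card_sum_alt n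
instance (n : Int) (out : Int) : Decidable (Spec_card_sum n out) := by unfold Spec_card_sum; infer_instance

-- ===== CLAIM (what is proved, stated in full; the proofs are below) =====
def Claim_equal_card_sum : Prop := ∀ (n : Int), Dom_card_sum n → Spec_card_sum n (card_sum n)

-- ===== LEMMAS AND PROOFS =====

-- sum of adjusted digits of a at positions 0..k-1 (what A's backward loop accumulates)
def pvS (a : List Int) (k : Nat) : Int :=
  ((List.range k).map (fun j => pvAdjustB (a.getD j 0) (j : Int))).sum

-- sum of adjusted digits front-to-back with a running position (what B computes)
def pvT : List Int → Int → Int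
  | [], _ => 0
  | d :: ds, i => pvAdjustB d i + pvT ds (i + 1)

theorem pvWhileA_unfold (a : List Int) (n : Int) :
    pvWhileA a n = if n < 10 then a ++ [n]
      else pvWhileA (a ++ [PySem.Int.mod n 10]) (PySem.Int.floordiv n 10) := by
  rw [pvWhileA]; split <;> rfl

theorem pvGoB_unfold (n i : Int) :
    pvGoB n i = if n < 10 then pvAdjustB n i
      else pvAdjustB (PySem.Int.mod n 10) i + pvGoB (PySem.Int.floordiv n 10) (i + 1) := by
  rw [pvGoB]; split <;> rfl

theorem pvWhileA_append (n : Int) (a : List Int) : pvWhileA a n = a ++ pvWhileA [] n := by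
  induction n, (0:Int) using pvGoB.induct generalizing a with
  | case1 n i h => rw [pvWhileA_unfold a, pvWhileA_unfold []]; simp [h]
  | case2 n i h ih =>
    rw [pvWhileA_unfold a, pvWhileA_unfold []]
    simp only [h, List.nil_append, ite_false]
    rw [ih, ih [PySem.Int.mod n 10]]
    simp

theorem pvWhileA_nil_unfold (n : Int) :
    pvWhileA [] n = if n < 10 then [n]
      else PySem.Int.mod n 10 :: pvWhileA [] (PySem.Int.floordiv n 10) := by
  rw [pvWhileA_unfold]
  split_ifs with h
  · rfl
  · rw [show ([]:List Int) ++ [PySem.Int.mod n 10] = [PySem.Int.mod n 10] from rfl, pvWhileA_append]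
    rfl

theorem pvGoB_eq_T (n i : Int) : pvGoB n i = pvT (pvWhileA [] n) i := by
  induction n, i using pvGoB.induct with
  | case1 n i h => rw [pvGoB_unfold, pvWhileA_nil_unfold]; simp [h, pvT]
  | case2 n i h ih =>
    rw [pvGoB_unfold, pvWhileA_nil_unfold]
    simp only [h, if_false, ite_false]
    rw [ih]
    rfl

theorem pvT_append (xs : List Int) (d : Int) (i : Int) :
    pvT (xs ++ [d]) i = pvT xs i + pvAdjustB d (i + xs.length) := by
  induction xs generalizing i with
  | nil => simp [pvT]
  | cons x xs ih =>
    simp only [List.cons_append, pvT, ih, List.length_cons]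
    push_cast
    ring_nf

theorem pvT_eq_S (a : List Int) (k : Nat) (hk : k ≤ a.length) : pvT (a.take k) 0 = pvS a k := by
  induction k with
  | zero => simp [pvT, pvS]
  | succ k ih =>
    have hk' : k < a.length := by omega
    rw [List.take_succ, List.getElem?_eq_getElem hk']
    simp only [Option.toList_some]
    rw [pvT_append, ih (by omega)]
    have hlen : ((a.take k).length : Int) = (k : Int) := by simp; omega
    rw [hlen]
    simp [pvS, List.range_succ, List.getD, List.getElem?_eq_getElem hk']

theorem pvLoop_eq_S (k : Nat) (a : List Int) : ∀ (a' : List Int) (r : Int),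
    a'.length = a.length → k ≤ a.length →
    (∀ j < k, a'.getD j 0 = a.getD j 0) →
    ((PySem.List.pyRange ((k : Int) - 1) (-1) (-1)).foldl pvLoopBodyA (a', r)).2 = r + pvS a k := by
  induction k with
  | zero =>
    intro a' r _ _ _
    rw [show ((0:Nat):Int) - 1 = -1 by norm_num, PySem.List.pyRange_neg_one_eq_nil (by omega)]
    simp [pvS]
  | succ k ih =>
    intro a' r hlen hk hagree
    have hklt : k < a.length := by omega
    have hklt' : k < a'.length := by omega
    rw [show ((k+1:Nat):Int) - 1 = (k:Int) by push_cast; ring,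
        PySem.List.pyRange_neg_one_cons (by omega : (-1:Int) < (k:Int)), List.foldl_cons]
    have hmod : PySem.Int.mod ((k:Nat):Int) 2 = ((k % 2 : Nat) : Int) := by
      rw [PySem.Int.mod_eq_emod_of_pos (by omega)]; exact_mod_cast (Int.natCast_mod k 2).symm
    have hgk : a'.getD k 0 = a.getD k 0 := hagree k (by omega)
    by_cases hp : k % 2 = 1
    · have hc : PySem.Int.mod ((k:Nat):Int) 2 = 1 := by rw [hmod, hp]; norm_num
      simp only [pvLoopBodyA, hc, if_pos, PySem.List.pyGetD_natCast, PySem.List.pySetD_natCast, hgk]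
      set v := (if a.getD k 0 * 2 > 9 then
        PySem.Int.mod (a.getD k 0 * 2) 10 + PySem.Int.floordiv (a.getD k 0 * 2) 10
        else a.getD k 0 * 2) with hv
      have hvget : (a'.set k v).getD k 0 = v := by
        rw [List.getD_eq_getElem _ _ (by simpa using hklt')]
        exact List.getElem_set_self (by simpa using hklt')
      rw [ih (a'.set k v) (r + (a'.set k v).getD k 0) (by simpa using hlen) (by omega)
        (fun j hj => by
          rw [List.getD, List.getElem?_set_ne (by omega), ← List.getD]
          exact hagree j (by omega))]
      have hva : v = pvAdjustB (a.getD k 0) (k:Int) := by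
        simp only [pvAdjustB, hc, if_pos, hv]
      rw [hvget, hva]
      simp [pvS, List.range_succ]
      ring
    · have hc : ¬ PySem.Int.mod ((k:Nat):Int) 2 = 1 := by
        rw [hmod]; intro hcon
        have : k % 2 = 1 := by exact_mod_cast hcon
        exact hp this
      simp only [pvLoopBodyA, hc, if_neg, if_false, PySem.List.pyGetD_natCast, hgk]
      rw [ih a' (r + a.getD k 0) hlen (by omega) (fun j hj => hagree j (by omega))]
      have hva : pvAdjustB (a[k]?.getD 0) (k:Int) = a[k]?.getD 0 := by
        simp only [pvAdjustB, hc, if_false]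
      simp [pvS, List.range_succ, hva]
      ring

theorem card_sum_eq (n : Int) : card_sum n = card_sum_alt n := by
  unfold card_sum card_sum_alt
  rw [pvLoop_eq_S (pvWhileA [] n).length (pvWhileA [] n) (pvWhileA [] n) 0 rfl le_rfl
    (fun _ _ => rfl)]
  rw [← pvT_eq_S _ _ le_rfl, List.take_length, pvGoB_eq_T]
  ring

-- ===== VERDICT (by name: the statement is the Claim_ definition above) =====
theorem card_sum_spec : Claim_equal_card_sum := by
  intro n _
  unfold Spec_card_sum
  exact card_sum_eq n
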